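-- pv_equiv track=rewrite | github.com/oliverlambson/advent-of-code-2013 | 3/pt2.py | get_symbol_neighbor_mask
-- ===== SOURCE A (Python) =====
-- RawMatrix = list[list[str]]
--
-- Mask = list[list[int | bool | None]]
--
-- def has_symbol_neighbor(
--     raw_matrix: RawMatrix, loc: tuple[int, int], symbols: list[str]
-- ) -> bool:
--     i_min = 0
--     i_max = len(raw_matrix[0]) - 1
--     j_min = 0
--     j_max = len(raw_matrix) - 1
--
--     i_loc = loc[0]
--     j_loc = loc[1]
--
--     i_vals = [i_loc + v for v in range(-1, 2, 1) if (i_min <= i_loc + v <= i_max)]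
--     j_vals = [j_loc + v for v in range(-1, 2, 1) if (j_min <= j_loc + v <= j_max)]
--
--     for j in j_vals:
--         for i in i_vals:
--             if i == i_loc and j == j_loc:
--                 continue
--             val = raw_matrix[j][i]
--             if val in symbols:
--                 return True
--
--     return False
--
-- def get_symbol_neighbor_mask(raw_matrix: RawMatrix, symbols: list[str]) -> Mask:
--     symbol_neighbor_mask = []
--     for j, line in enumerate(raw_matrix):
--         symbol_neighbor_mask.append([])
--         for i, _ in enumerate(line):
--             mask = has_symbol_neighbor(raw_matrix, (i, j), symbols)
--             symbol_neighbor_mask[j].append(mask)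
--     return symbol_neighbor_mask
-- ===== SOURCE B (Python) =====
-- def get_symbol_neighbor_mask(raw_matrix, symbols):
--     positions = [
--         (i, j)
--         for j, line in enumerate(raw_matrix)
--         for i, val in enumerate(line)
--         if val in symbols
--     ]
--     offsets = [(-1, -1), (0, -1), (1, -1), (-1, 0), (1, 0), (-1, 1), (0, 1), (1, 1)]
--     return [
--         [any((i + di, j + dj) in positions for di, dj in offsets) for i, _ in enumerate(line)]
--         for j, line in enumerate(raw_matrix)
--     ]
-- ===== Notes on version B (the rewrite author's own statement) =====
-- stated objective: alternative
-- what changed: B builds the list of symbol coordinates once and computes each mask cell as an adjacency test of that cell against the position index, instead of A's per-cell probe of all range-clamped in-bounds neighbors with grid reads and early return.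
-- outside the precondition, e.g. on get_symbol_neighbor_mask([[], ['*', '*']], ['*']): A returns [[], [False, False]], B returns [[], [True, True]]; on get_symbol_neighbor_mask([['.', '.'], ['*']], ['*']): A raises IndexError, B returns [[True, True], [False]]
import Mathlib
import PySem

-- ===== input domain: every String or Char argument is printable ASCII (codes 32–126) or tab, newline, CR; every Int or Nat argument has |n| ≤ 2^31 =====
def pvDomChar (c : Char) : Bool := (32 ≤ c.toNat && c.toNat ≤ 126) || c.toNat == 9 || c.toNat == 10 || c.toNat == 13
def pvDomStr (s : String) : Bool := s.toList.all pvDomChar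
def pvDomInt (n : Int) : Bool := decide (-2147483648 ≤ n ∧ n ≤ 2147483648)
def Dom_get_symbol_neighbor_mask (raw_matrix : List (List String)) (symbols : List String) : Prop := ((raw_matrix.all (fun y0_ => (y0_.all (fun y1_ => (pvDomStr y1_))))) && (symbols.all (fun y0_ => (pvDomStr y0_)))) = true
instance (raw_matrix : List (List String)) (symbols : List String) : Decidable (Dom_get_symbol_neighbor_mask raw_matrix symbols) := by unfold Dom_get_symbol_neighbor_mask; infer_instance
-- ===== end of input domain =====

-- B rebuilds the mask from a one-pass index of symbol coordinates (adjacency test per cell)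
-- instead of A's per-cell probe of its range-clamped neighbors; equivalence proved on Pre_ below.

-- ===== PORT A =====
def has_symbol_neighbor (raw_matrix : List (List String)) (loc : Int × Int) (symbols : List String) : Bool :=
  let i_min : Int := 0
  let i_max : Int := (raw_matrix.headD []).length - 1   -- raw_matrix[0]: only reached when raw_matrix ≠ []
  let j_min : Int := 0
  let j_max : Int := raw_matrix.length - 1
  let i_loc := loc.1
  let j_loc := loc.2
  let i_vals := ((PySem.List.pyRange (-1) 2 1).filter
    (fun v => decide (i_min ≤ i_loc + v ∧ i_loc + v ≤ i_max))).map (fun v => i_loc + v)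
  let j_vals := ((PySem.List.pyRange (-1) 2 1).filter
    (fun v => decide (j_min ≤ j_loc + v ∧ j_loc + v ≤ j_max))).map (fun v => j_loc + v)
  j_vals.any (fun j => i_vals.any (fun i =>
    if i == i_loc && j == j_loc then false
    else
      -- raw_matrix[j][i]: under Pre_ both indexes are in range, so the defaults are unreachable
      symbols.contains ((((PySem.List.pyGet? raw_matrix j).getD []) |> (fun row => PySem.List.pyGet? row i)).getD "")))

def get_symbol_neighbor_mask (raw_matrix : List (List String)) (symbols : List String) : List (List Bool) :=
  (PySem.List.enumerate raw_matrix 0).foldl (fun acc p =>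
    acc ++ [(PySem.List.enumerate p.2 0).foldl (fun row q =>
      row ++ [has_symbol_neighbor raw_matrix (q.1, p.1) symbols]) []]) []

-- ===== PORT B =====
def pvPositions (raw_matrix : List (List String)) (symbols : List String) : List (Int × Int) :=
  (PySem.List.enumerate raw_matrix 0).flatMap (fun p =>
    (PySem.List.enumerate p.2 0).filterMap (fun q =>
      if symbols.contains q.2 then some (q.1, p.1) else none))

def pvOffsets : List (Int × Int) :=
  [(-1, -1), (0, -1), (1, -1), (-1, 0), (1, 0), (-1, 1), (0, 1), (1, 1)]

def get_symbol_neighbor_mask_alt (raw_matrix : List (List String)) (symbols : List String) : List (List Bool) :=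
  let positions := pvPositions raw_matrix symbols
  (PySem.List.enumerate raw_matrix 0).map (fun p =>
    (PySem.List.enumerate p.2 0).map (fun q =>
      pvOffsets.any (fun d => positions.contains (q.1 + d.1, p.1 + d.2))))

-- ===== PRECONDITION & SPEC =====
-- Pre_ requires every row to be at least as long as row 0 and no symbol to occur in the part of
-- a row beyond row 0's width: on other ragged inputs A typically raises IndexError probing a
-- missing cell, and where it does return, whether cells beyond row-0's width belong to the grid
-- is an unspecified ragged-geometry corner on which A's and B's readings are both defensible.
def Pre_get_symbol_neighbor_mask (raw_matrix : List (List String)) (symbols : List String) : Prop :=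
  ∀ row ∈ raw_matrix, (raw_matrix.headD []).length ≤ row.length ∧
    ∀ x ∈ row.drop (raw_matrix.headD []).length, x ∉ symbols
instance (raw_matrix : List (List String)) (symbols : List String) : Decidable (Pre_get_symbol_neighbor_mask raw_matrix symbols) := by unfold Pre_get_symbol_neighbor_mask; infer_instance

def pvWitness_get_symbol_neighbor_mask : List (List String) × List String :=
  ([[".", "*", "."], ["1", ".", "."]], ["*", "#"])

def Spec_get_symbol_neighbor_mask (raw_matrix : List (List String)) (symbols : List String) (out : List (List Bool)) : Prop := out = get_symbol_neighbor_mask_alt raw_matrix symbols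
instance (raw_matrix : List (List String)) (symbols : List String) (out : List (List Bool)) : Decidable (Spec_get_symbol_neighbor_mask raw_matrix symbols out) := by unfold Spec_get_symbol_neighbor_mask; infer_instance

-- ===== CLAIM (what is proved, stated in full; the proofs are below) =====
def Claim_equal_get_symbol_neighbor_mask : Prop := ∀ (raw_matrix : List (List String)) (symbols : List String), Dom_get_symbol_neighbor_mask raw_matrix symbols → Pre_get_symbol_neighbor_mask raw_matrix symbols → Spec_get_symbol_neighbor_mask raw_matrix symbols (get_symbol_neighbor_mask raw_matrix symbols)

-- ===== LEMMAS AND PROOFS =====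

theorem mem_pvPositions (rm : List (List String)) (s : List String) (x y : Int) :
    (x, y) ∈ pvPositions rm s ↔
      ∃ (jn : Nat) (hj : jn < rm.length) (im : Nat) (hi : im < rm[jn].length),
        s.contains rm[jn][im] = true ∧ x = (im : Int) ∧ y = (jn : Int) := by
  unfold pvPositions
  simp only [List.mem_flatMap, List.mem_filterMap, PySem.List.mem_enumerate_iff]
  constructor
  · rintro ⟨p, ⟨jn, hj, rfl⟩, q, ⟨im, hi, rfl⟩, hq⟩
    simp only [zero_add] at *
    split at hq
    · rename_i hc
      refine ⟨jn, hj, im, hi, hc, ?_, ?_⟩ <;> simp_all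
    · simp at hq
  · rintro ⟨jn, hj, im, hi, hc, rfl, rfl⟩
    exact ⟨(jn, rm[jn]), ⟨jn, hj, by simp⟩, ((im : Int), rm[jn][im]), ⟨im, hi, by simp⟩, by simp only [hc, if_true]⟩

theorem cell_read (rm : List (List String)) (j i : Int) (hj0 : 0 ≤ j) (hj : j.toNat < rm.length)
    (hi0 : 0 ≤ i) (hi : i.toNat < rm[j.toNat].length) :
    (((PySem.List.pyGet? rm j).getD []) |> (fun row => PySem.List.pyGet? row i)).getD ""
      = rm[j.toNat][i.toNat] := by
  rw [PySem.List.pyGet?_of_nonneg _ hj0]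
  simp only [List.getElem?_eq_getElem hj, Option.getD_some]
  rw [PySem.List.pyGet?_of_nonneg _ hi0]
  simp only [List.getElem?_eq_getElem hi, Option.getD_some]

theorem pos_of_cell (rm : List (List String)) (s : List String)
    (hpre : ∀ row ∈ rm, (rm.headD []).length ≤ row.length ∧
      ∀ x ∈ row.drop (rm.headD []).length, x ∉ s) (x y : Int)
    (hx0 : 0 ≤ x) (hy0 : 0 ≤ y) (hy : y < (rm.length : Int)) (hx : x < ((rm.headD []).length : Int))
    (hc : ((((PySem.List.pyGet? rm y).getD []) |> (fun row => PySem.List.pyGet? row x)).getD "") ∈ s) :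
    (x, y) ∈ pvPositions rm s := by
  have hyN : y.toNat < rm.length := by omega
  have hrow : (rm.headD []).length ≤ rm[y.toNat].length := (hpre _ (List.getElem_mem hyN)).1
  have hxN : x.toNat < rm[y.toNat].length := by omega
  rw [cell_read rm y x hy0 hyN hx0 hxN] at hc
  exact (mem_pvPositions rm s x y).mpr ⟨y.toNat, hyN, x.toNat, hxN, by simpa using hc,
    (Int.toNat_of_nonneg hx0).symm, (Int.toNat_of_nonneg hy0).symm⟩

theorem cell_of_pos (rm : List (List String)) (s : List String)
    (hpre : ∀ row ∈ rm, (rm.headD []).length ≤ row.length ∧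
      ∀ x ∈ row.drop (rm.headD []).length, x ∉ s) (x y : Int)
    (hmem : (x, y) ∈ pvPositions rm s) :
    0 ≤ x ∧ x ≤ ((rm.headD []).length : Int) - 1 ∧ 0 ≤ y ∧ y ≤ (rm.length : Int) - 1 ∧
      ((((PySem.List.pyGet? rm y).getD []) |> (fun row => PySem.List.pyGet? row x)).getD "") ∈ s := by
  obtain ⟨jn, hj, im, hi, hc, rfl, rfl⟩ := (mem_pvPositions rm s x y).mp hmem
  have him : im < (rm.headD []).length := by
    by_contra hge
    rw [not_lt] at hge
    have hdrop : rm[jn][im] ∈ rm[jn].drop (rm.headD []).length := by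
      have : (rm[jn].drop (rm.headD []).length)[im - (rm.headD []).length]'(by
          rw [List.length_drop]; omega) = rm[jn][im] := by
        rw [List.getElem_drop]
        congr 1
        omega
      rw [← this]
      exact List.getElem_mem _
    exact absurd (by simpa using hc) ((hpre _ (List.getElem_mem hj)).2 _ hdrop)
  refine ⟨by omega, by omega, by omega, by omega, ?_⟩
  rw [cell_read rm _ _ (by omega) (by simpa using hj) (by omega) (by simpa using hi)]
  simpa using hc

theorem cell_eq (rm : List (List String)) (s : List String)
    (hpre : ∀ row ∈ rm, (rm.headD []).length ≤ row.length ∧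
      ∀ x ∈ row.drop (rm.headD []).length, x ∉ s)
    (jn : Nat) (hj : jn < rm.length) (im : Nat) (_hi : im < rm[jn].length) :
    has_symbol_neighbor rm ((im : Int), (jn : Int)) s =
      pvOffsets.any (fun d => (pvPositions rm s).contains ((im : Int) + d.1, (jn : Int) + d.2)) := by
  rw [Bool.eq_iff_iff]
  unfold has_symbol_neighbor
  have hr : PySem.List.pyRange (-1) 2 1 = [-1, 0, 1] := by decide
  simp only [hr, List.any_eq_true, List.mem_map, List.mem_filter, List.mem_cons,
    List.not_mem_nil, or_false, decide_eq_true_eq, Bool.and_eq_true, beq_iff_eq,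
    List.contains_iff_mem, pvOffsets]
  constructor
  · rintro ⟨wj, ⟨vj, ⟨hvj, hvj0, hvj1⟩, rfl⟩, wi, ⟨vi, ⟨hvi, hvi0, hvi1⟩, rfl⟩, hbody⟩
    split_ifs at hbody with hif
    have hp := pos_of_cell rm s hpre ((im : Int) + vi) ((jn : Int) + vj) hvi0 hvj0 (by omega) (by omega) (by simpa using hbody)
    refine ⟨(vi, vj), ?_, hp⟩
    rcases hvi with rfl | rfl | rfl <;> rcases hvj with rfl | rfl | rfl <;> simp_all
  · rintro ⟨d, hd, hmem⟩
    obtain ⟨hx0, hx1, hy0, hy1, hc⟩ := cell_of_pos rm s hpre _ _ hmem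
    have hd1 : d.1 = -1 ∨ d.1 = 0 ∨ d.1 = 1 := by
      rcases hd with rfl | rfl | rfl | rfl | rfl | rfl | rfl | rfl <;> simp
    have hd2 : d.2 = -1 ∨ d.2 = 0 ∨ d.2 = 1 := by
      rcases hd with rfl | rfl | rfl | rfl | rfl | rfl | rfl | rfl <;> simp
    have hdne : ¬(d.1 = 0 ∧ d.2 = 0) := by
      rcases hd with rfl | rfl | rfl | rfl | rfl | rfl | rfl | rfl <;> simp
    refine ⟨↑jn + d.2, ⟨d.2, ⟨hd2, hy0, hy1⟩, rfl⟩, ↑im + d.1, ⟨d.1, ⟨hd1, hx0, hx1⟩, rfl⟩, ?_⟩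
    rw [if_neg]
    · simpa using hc
    · rintro ⟨h1, h2⟩; exact hdne ⟨by omega, by omega⟩

-- ===== VERDICT (by name: the statement is the Claim_ definition above) =====
theorem get_symbol_neighbor_mask_spec : Claim_equal_get_symbol_neighbor_mask := by
  intro rm s _hdom hpre
  unfold Spec_get_symbol_neighbor_mask get_symbol_neighbor_mask get_symbol_neighbor_mask_alt
  rw [PySem.List.foldl_append_singleton_eq_map]
  refine List.map_congr_left ?_
  intro p hp
  rw [PySem.List.foldl_append_singleton_eq_map]
  refine List.map_congr_left ?_
  intro q hq
  rw [PySem.List.mem_enumerate_iff] at hp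
  obtain ⟨jn, hj, rfl⟩ := hp
  rw [PySem.List.mem_enumerate_iff] at hq
  obtain ⟨im, hi, rfl⟩ := hq
  simpa using cell_eq rm s hpre jn hj im hi
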